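-- pv_equiv track=rewrite | github.com/Sriharsha-Pamidi/143ECE | hw_module/gather_values.py | gather_values
-- ===== SOURCE A (Python) =====
-- def gather_values(sample_list):
-- 	''' Now that you have get_sample working, generate n samples and tally the number of times an existing key is repeated.
-- 	Generate a new dictionary with bitstrings as keys and with values as lists that contain the corresponding mapped
-- 	values from map_bitstring. Here is an example for n=20,
-- 	Write a function gather_values that can produce the following output from x:
-- 	x=get_sample(nbits=2,prob={'00':1/4,'01':1/4,'10':1/4,'11':1/4},n=20)
-- 	{'10': [1, 1, 1, 1, 1],
-- 	'11': [1, 1, 1, 1, 1, 1],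
-- 	'01': [1, 1, 1],
-- 	'00': [0, 0, 0, 0, 0, 0]}'''
-- 	assert type(sample_list) == list
-- 	from collections import defaultdict
--
-- 	gather_dict = defaultdict(list)
-- 	for bits in sample_list:
-- 		count_0 = 0
-- 		for i in range(len(bits)):
-- 			if bits[i] == '0':
-- 				count_0 += 1
-- 		if count_0 > (len(bits) - count_0):
-- 			gather_dict[bits].append(0)
-- 		else:
-- 			gather_dict[bits].append(1)
-- 		assert bits in gather_dict
--
-- 	sample_count = 0
-- 	for count_list in gather_dict.values():
-- 		sample_count += len(count_list)
-- 	assert sample_count == len(sample_list)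
--
-- 	return gather_dict
-- ===== SOURCE B (Python) =====
-- def gather_values(sample_list):
--     assert type(sample_list) == list
--     from collections import Counter, defaultdict
--     counts = Counter(sample_list)
--     gather_dict = defaultdict(list)
--     for bits, c in counts.items():
--         zeros = sum(ch == '0' for ch in bits)
--         val = 0 if zeros > len(bits) - zeros else 1
--         gather_dict[bits] = [val] * c
--     return gather_dict
-- ===== Notes on version B (the rewrite author's own statement) =====
-- stated objective: alternative
-- what changed: Instead of appending one value per sample into a defaultdict, B counts occurrences once with Counter and then builds each key's list in one step as [val]*count over the distinct keys.
import Mathlib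
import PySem

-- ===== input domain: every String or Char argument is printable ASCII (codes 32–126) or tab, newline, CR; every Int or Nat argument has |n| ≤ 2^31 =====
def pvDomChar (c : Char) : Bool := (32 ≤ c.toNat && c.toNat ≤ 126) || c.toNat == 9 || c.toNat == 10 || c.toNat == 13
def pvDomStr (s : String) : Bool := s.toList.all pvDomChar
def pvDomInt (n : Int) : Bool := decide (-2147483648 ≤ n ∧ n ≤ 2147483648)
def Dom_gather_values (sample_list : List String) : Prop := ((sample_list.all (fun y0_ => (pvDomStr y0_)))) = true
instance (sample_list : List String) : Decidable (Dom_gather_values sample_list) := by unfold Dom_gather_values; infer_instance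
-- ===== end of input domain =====

-- B replaces A's append-per-sample pass by a Counter pass plus [val]*count per distinct key (alternative decomposition, same cost).

-- ===== PORT A =====
-- A's per-sample pass: inner index loop counts '0' chars (bits[i] is a 1-char string; ported
-- as the char of bits.toList at that index, exact on the in-range indices the loop uses),
-- then appends 0 or 1 to gather_dict[bits] (defaultdict(list) append = Dict.modify with default []).
def gather_values (sample_list : List String) : List (String × List Int) :=
  (sample_list.foldl (fun d bits =>
      let count_0 : Int :=
        (PySem.List.pyRange 0 (PySem.List.len bits.toList) 1).foldl
          (fun c i => if PySem.List.pyGetD bits.toList i ' ' == '0' then c + 1 else c) 0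
      if count_0 > PySem.List.len bits.toList - count_0 then
        d.modify bits [] (fun l => l ++ [(0 : Int)])
      else
        d.modify bits [] (fun l => l ++ [(1 : Int)]))
    PySem.Dict.empty).items

-- ===== PORT B =====
-- B's pass: counts = Counter(sample_list); then one insert of [val]*c per distinct key.
def gather_values_alt (sample_list : List String) : List (String × List Int) :=
  let counts := PySem.Dict.counter sample_list
  (counts.items.foldl (fun d p =>
      let zeros : Int := (p.1.toList.map (fun ch => if ch == '0' then (1 : Int) else 0)).sum
      let val : Int := if zeros > PySem.Str.len p.1 - zeros then 0 else 1
      d.insert p.1 (List.replicate p.2.toNat val))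
    PySem.Dict.empty).items

-- ===== PRECONDITION & SPEC =====
def Spec_gather_values (sample_list : List String) (out : List (String × List Int)) : Prop := out = gather_values_alt sample_list
instance (sample_list : List String) (out : List (String × List Int)) : Decidable (Spec_gather_values sample_list out) := by unfold Spec_gather_values; infer_instance

-- ===== CLAIM (what is proved, stated in full; the proofs are below) =====
def Claim_equal_gather_values : Prop := ∀ (sample_list : List String), Dom_gather_values sample_list → Spec_gather_values sample_list (gather_values sample_list)

-- ===== LEMMAS AND PROOFS =====

-- the majority value both programs assign to a bitstring
def pvVal (bits : String) : Int :=
  if (bits.toList.count '0' : Int) > (bits.toList.length : Int) - (bits.toList.count '0' : Int)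
  then 0 else 1

theorem pv_filter_map_replicate (c : String) (v : String → Int) :
    ∀ (l : List String), (l.filter (fun b => b == c)).map v = List.replicate (l.count c) (v c) := by
  intro l
  induction l with
  | nil => simp
  | cons x xs ih =>
    by_cases h : x = c
    · subst h; simp [ih, List.replicate_succ]
    · simp [h, ih]

theorem pvA_items (sample_list : List String) :
    gather_values sample_list =
      (PySem.Set.ofList sample_list).map
        (fun k => (k, List.replicate (sample_list.count k) (pvVal k))) := by
  unfold gather_values
  have hstep : (fun (d : PySem.Dict String (List Int)) (bits : String) =>
      let count_0 : Int :=
        (PySem.List.pyRange 0 (PySem.List.len bits.toList) 1).foldl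
          (fun c i => if PySem.List.pyGetD bits.toList i ' ' == '0' then c + 1 else c) 0
      if count_0 > PySem.List.len bits.toList - count_0 then
        d.modify bits [] (fun l => l ++ [(0 : Int)])
      else
        d.modify bits [] (fun l => l ++ [(1 : Int)])) =
      (fun d bits => d.modify bits [] (fun l => l ++ [pvVal bits])) := by
    funext d bits
    have hc : (PySem.List.pyRange 0 (PySem.List.len bits.toList) 1).foldl
        (fun c i => if PySem.List.pyGetD bits.toList i ' ' == '0' then c + 1 else c) (0 : Int)
        = (bits.toList.count '0' : Int) := by
      rw [PySem.List.foldl_pyRange_zero_pyGetD bits.toList ' '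
        (fun c ch => if ch == '0' then c + 1 else c) 0,
        PySem.List.foldl_beq_add_one]
      simp
    simp only [PySem.List.len] at hc
    simp only [PySem.List.len, hc, pvVal]
    split <;> rfl
  rw [hstep]
  have hkeys : (sample_list.foldl
      (fun d bits => d.modify bits [] (fun l => l ++ [pvVal bits])) PySem.Dict.empty).keys
      = PySem.Set.ofList sample_list := by
    rw [PySem.Dict.keys_foldl_modify sample_list [] (fun _ bits l => l ++ [pvVal bits])]
    rfl
  have hnd : (sample_list.foldl
      (fun d bits => d.modify bits [] (fun l => l ++ [pvVal bits])) PySem.Dict.empty).keys.Nodup := by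
    rw [hkeys]; exact PySem.Set.nodup_ofList sample_list
  rw [PySem.Dict.items_eq_map_keys _ hnd [], hkeys]
  apply List.map_congr_left
  intro k _
  have hfold : sample_list.foldl
      (fun d bits => d.modify bits [] (fun l => l ++ [pvVal bits])) PySem.Dict.empty
      = (sample_list.map (fun b => (b, pvVal b))).foldl
          (fun d p => d.modify p.1 [] (fun l => l ++ [p.2])) PySem.Dict.empty := by
    rw [List.foldl_map]
  rw [hfold, PySem.Dict.getD_foldl_modify_append]
  simp only [PySem.Dict.getD_empty, List.nil_append, List.filter_map, List.map_map,
    Function.comp_def]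
  rw [pv_filter_map_replicate k pvVal sample_list]

theorem pvB_items (sample_list : List String) :
    gather_values_alt sample_list =
      (PySem.Set.ofList sample_list).map
        (fun k => (k, List.replicate (sample_list.count k) (pvVal k))) := by
  unfold gather_values_alt
  have hval : (fun (d : PySem.Dict String (List Int)) (p : String × Int) =>
      let zeros : Int := (p.1.toList.map (fun ch => if ch == '0' then (1 : Int) else 0)).sum
      let val : Int := if zeros > PySem.Str.len p.1 - zeros then 0 else 1
      d.insert p.1 (List.replicate p.2.toNat val)) =
      (fun d p => d.insert p.1 (List.replicate p.2.toNat (pvVal p.1))) := by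
    funext d p
    have hz : (p.1.toList.map (fun ch => if ch == '0' then (1 : Int) else 0)).sum
        = (p.1.toList.count '0' : Int) := by
      rw [PySem.List.sum_map_ite_one_zero]
      simp [List.count]
    simp only [hz, pvVal, PySem.Str.len_eq]
  rw [hval]
  rw [PySem.Dict.items_foldl_insert_fresh (PySem.Dict.counter sample_list).items
    (fun p => p.1) (fun p => List.replicate p.2.toNat (pvVal p.1)) PySem.Dict.empty
    (by intro a _; exact PySem.Dict.contains_empty _)
    (by rw [show List.map (fun (p : String × Int) => p.1) (PySem.Dict.counter sample_list).items
          = (PySem.Dict.counter sample_list).keys from rfl]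
        exact PySem.Dict.nodup_keys_counter sample_list)]
  rw [PySem.Dict.items_counter]
  simp [List.map_map, Function.comp_def]
  rfl

-- ===== VERDICT (by name: the statement is the Claim_ definition above) =====
theorem gather_values_spec : Claim_equal_gather_values := by
  intro sample_list _
  unfold Spec_gather_values
  rw [pvA_items, pvB_items]
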